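-- pv_equiv track=rewrite | github.com/adamgeo1/LatePassMessager | Main.py | split_by_blank_rows
-- ===== SOURCE A (Python) =====
-- def split_by_blank_rows(data):
--     blocks = []
--     current = []
--     row_indices = []
--     current_start = 1
--     for i, row in enumerate(data[1:], start=2):
--         if all(cell.strip() == "" for cell in row):
--             if current:
--                 blocks.append(current)
--                 row_indices.append(current_start)
--                 current = []
--             current_start = i + 1
--         else:
--             if not current:
--                 current_start = i
--             current.append(row)
--     if current:
--         blocks.append(current)
--         row_indices.append(current_start)
--     return data, blocks, row_indices
-- ===== SOURCE B (Python) =====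
-- def split_by_blank_rows(data):
--     def is_blank(row):
--         return all(cell.strip() == "" for cell in row)
--     blocks = []
--     row_indices = []
--     i, n = 1, len(data)
--     while i < n:
--         if is_blank(data[i]):
--             i += 1
--         else:
--             j = i
--             while j < n and not is_blank(data[j]):
--                 j += 1
--             blocks.append(data[i:j])
--             row_indices.append(i + 1)
--             i = j
--     return data, blocks, row_indices
-- ===== Notes on version B (the rewrite author's own statement) =====
-- stated objective: simpler
-- what changed: Replaces the single-pass accumulator state machine (current block, pending start index, post-loop flush) with a two-pointer scan that skips blank rows and slices out each maximal non-blank run directly, so no partial-block state or final flush is needed.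
import Mathlib
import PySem

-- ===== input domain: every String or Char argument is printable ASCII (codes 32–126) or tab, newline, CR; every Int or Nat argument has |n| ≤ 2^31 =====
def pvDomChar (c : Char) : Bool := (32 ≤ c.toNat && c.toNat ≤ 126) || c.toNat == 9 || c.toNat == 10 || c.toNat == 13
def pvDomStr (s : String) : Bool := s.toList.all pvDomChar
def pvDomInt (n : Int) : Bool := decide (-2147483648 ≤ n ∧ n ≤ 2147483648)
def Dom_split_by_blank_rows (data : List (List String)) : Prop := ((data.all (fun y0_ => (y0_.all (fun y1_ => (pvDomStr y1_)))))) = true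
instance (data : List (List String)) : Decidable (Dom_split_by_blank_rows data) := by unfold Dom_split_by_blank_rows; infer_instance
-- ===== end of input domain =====

-- B replaces A's one-pass accumulator state machine by a two-pointer scan that skips blank
-- rows and cuts out each maximal non-blank run directly (objective: simpler).


-- all(cell.strip() == "" for cell in row)  — the blank-row test both Pythons compute
def pvIsBlank (row : List String) : Bool := row.all (fun cell => PySem.Str.strip cell == "")

-- ===== PORT A =====
-- A's for-loop as structural recursion over enumerate(data[1:], start=2);
-- state = (blocks, current, row_indices, current_start)
def loopA : List (Int × List String) → List (List (List String)) × List (List String) × List Int × Int → List (List (List String)) × List (List String) × List Int × Int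
  | [], st => st
  | (i, row) :: rest, (blocks, current, row_indices, current_start) =>
    if pvIsBlank row then
      if current ≠ [] then loopA rest (blocks ++ [current], [], row_indices ++ [current_start], i + 1)
      else loopA rest (blocks, current, row_indices, i + 1)
    else
      if current = [] then loopA rest (blocks, current ++ [row], row_indices, i)
      else loopA rest (blocks, current ++ [row], row_indices, current_start)

def split_by_blank_rows (data : List (List String)) : List (List String) × List (List (List String)) × List Int :=
  let st := loopA (PySem.List.enumerate (PySem.List.slice data (some 1) none) 2) ([], [], [], 1)
  if st.2.1 ≠ [] then (data, st.1 ++ [st.2.1], st.2.2.1 ++ [st.2.2.2])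
  else (data, st.1, st.2.2.1)

-- ===== PORT B =====
-- inner while of Source B: the maximal non-blank run data[i:j] and the rest data[j:]
def takeRunB : List (List String) → List (List String) × List (List String)
  | [] => ([], [])
  | row :: rs =>
    if pvIsBlank row then ([], row :: rs)
    else
      let p := takeRunB rs
      (row :: p.1, p.2)

-- used by goB's termination proof (the outer while advances past each run)
lemma takeRunB_snd_length_le : ∀ (l : List (List String)), (takeRunB l).2.length ≤ l.length := by
  intro l
  induction l with
  | nil => simp [takeRunB]
  | cons row rs ih =>
    simp only [takeRunB]
    split
    · simp
    · simpa using Nat.le_succ_of_le ih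

-- outer while of Source B over the suffix starting at python index i (i+1 is the reported index)
def goB (i : Int) : List (List String) → List (List (List String)) × List Int
  | [] => ([], [])
  | row :: rs =>
    if pvIsBlank row then goB (i + 1) rs
    else
      let p := takeRunB rs
      let q := goB (i + 1 + (p.1.length : Int)) p.2
      ((row :: p.1) :: q.1, (i + 1) :: q.2)
  termination_by l => l.length
  decreasing_by
    · simp
    · have := takeRunB_snd_length_le rs; simp at *; omega

def split_by_blank_rows_alt (data : List (List String)) : List (List String) × List (List (List String)) × List Int :=
  let r := goB 1 (data.drop 1)
  (data, r.1, r.2)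

-- ===== PRECONDITION & SPEC =====
def Spec_split_by_blank_rows (data : List (List String)) (out : List (List String) × List (List (List String)) × List Int) : Prop := out = split_by_blank_rows_alt data
instance (data : List (List String)) (out : List (List String) × List (List (List String)) × List Int) : Decidable (Spec_split_by_blank_rows data out) := by unfold Spec_split_by_blank_rows; infer_instance

-- ===== CLAIM (what is proved, stated in full; the proofs are below) =====
def Claim_equal_split_by_blank_rows : Prop := ∀ (data : List (List String)), Dom_split_by_blank_rows data → Spec_split_by_blank_rows data (split_by_blank_rows data)

-- ===== LEMMAS AND PROOFS =====

-- A's final flush, applied to the loop state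
def finishA (st : List (List (List String)) × List (List String) × List Int × Int) : List (List (List String)) × List Int :=
  if st.2.1 ≠ [] then (st.1 ++ [st.2.1], st.2.2.1 ++ [st.2.2.2]) else (st.1, st.2.2.1)

-- the loop invariant: running A's loop from an arbitrary state and flushing equals B's
-- run-splitting of the remaining rows (mid-run: the open block is completed by the next run)
lemma loopA_goB : ∀ (l : List (List String)) (i : Int) (blocks : List (List (List String)))
    (cur : List (List String)) (idxs : List Int) (cs : Int),
    finishA (loopA (PySem.List.enumerate l i) (blocks, cur, idxs, cs)) =
      if cur = [] then (blocks ++ (goB (i - 1) l).1, idxs ++ (goB (i - 1) l).2)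
      else (blocks ++ ((cur ++ (takeRunB l).1) ::
              (goB (i - 1 + ((takeRunB l).1.length : Int)) (takeRunB l).2).1),
            idxs ++ (cs ::
              (goB (i - 1 + ((takeRunB l).1.length : Int)) (takeRunB l).2).2)) := by
  intro l
  induction l with
  | nil =>
    intro i blocks cur idxs cs
    by_cases h : cur = [] <;>
      simp [PySem.List.enumerate, loopA, goB, takeRunB, finishA, h]
  | cons row rs ih =>
    intro i blocks cur idxs cs
    rw [PySem.List.enumerate_cons]
    by_cases hb : pvIsBlank row = true
    · by_cases h : cur = []
      · subst h
        simp only [loopA, if_pos hb, ne_eq, not_true_eq_false, if_false]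
        rw [ih]
        have e1 : i + 1 - 1 = i := by ring
        have e2 : i - 1 + 1 = i := by ring
        simp [goB, if_pos hb, e1, e2]
      · simp only [loopA, if_pos hb, ne_eq, h, not_false_eq_true, if_pos]
        rw [ih]
        have e1 : i + 1 - 1 = i := by ring
        have e2 : i - 1 + 1 = i := by ring
        simp [goB, takeRunB, if_pos hb, e1, e2, h]
    · by_cases h : cur = []
      · subst h
        simp only [loopA, if_neg hb, ne_eq, not_true_eq_false, ite_true]
        rw [ih]
        have hne : ([row] : List (List String)) ≠ [] := by simp
        have e1 : ∀ n : Nat, i + 1 - 1 + (n : Int) = i - 1 + 1 + (n : Int) := by intro n; ring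
        have e2 : i - 1 + 1 = i := by ring
        simp [hne, goB, takeRunB, if_neg hb, e1, e2]
      · simp only [loopA, if_neg hb, if_neg h, ite_false]
        rw [ih]
        have hne : cur ++ [row] ≠ [] := by simp
        have e3 : i - 1 + (((row :: (takeRunB rs).1).length : Nat) : Int)
            = i + 1 - 1 + (((takeRunB rs).1.length : Nat) : Int) := by
          push_cast [List.length_cons]; ring
        simp [hne, h, takeRunB, if_neg hb, e3, List.append_assoc]

-- ===== VERDICT (by name: the statement is the Claim_ definition above) =====
theorem split_by_blank_rows_spec : Claim_equal_split_by_blank_rows := by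
  intro data _
  unfold Spec_split_by_blank_rows split_by_blank_rows split_by_blank_rows_alt
  rw [PySem.List.slice_from_one]
  have h := loopA_goB data.tail 2 [] [] [] 1
  simp only [if_pos rfl, List.nil_append] at h
  unfold finishA at h
  norm_num at h
  rw [← List.drop_one]
  by_cases hc : (loopA (PySem.List.enumerate data.tail 2) ([], [], [], 1)).2.1 = []
  · simp [hc] at h
    simp [hc, Prod.mk.eta]
    exact h
  · simp [hc] at h
    simp [hc, Prod.mk.eta]
    exact h
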